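-- pv_equiv track=rewrite | github.com/heyaaakash/roastmyaudio | whisper-flow/src/macos_app/menubar_dictation.py | _filter_hallucinations
-- ===== SOURCE A (Python) =====
-- def _filter_hallucinations(text: str) -> str:
--     if not text or len(text.strip()) < 3: return text
--     words = text.split()
--     total_words = len(words)
--     word_counts = {}
--     for word in words:
--         normalized = word.lower().rstrip('.,!?;:')
--         word_counts[normalized] = word_counts.get(normalized, 0) + 1
--     if word_counts:
--         most_common_word = max(word_counts, key=word_counts.get)
--         if word_counts[most_common_word] / total_words > 0.1:
--             filtered_words = [w for w in words if w.lower().rstrip('.,!?;:') != most_common_word]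
--             return _filter_hallucinations(" ".join(filtered_words)) if filtered_words else ""
--     hallucination_indicators = {'you', 'i', 'uh', 'um', 'ah', 'so', 'ok', 'thank', 'well', 'like', 'just'}
--     hallucin_count = sum(1 for word in words if word.lower().rstrip('.,!?;:') in hallucination_indicators)
--     if hallucin_count / total_words > 0.3:
--         real_words = [w for w in words if w.lower().rstrip('.,!?;:') not in hallucination_indicators]
--         return " ".join(real_words) if len(real_words) >= 3 else ""
--     return text.strip()
-- ===== SOURCE B (Python) =====
-- # Iterative re-implementation: a while-loop replaces A's tail recursion; each word is
-- # normalized once per pass (A renormalizes per comprehension); the filler count is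
-- # derived from the kept list instead of a separate summing pass; ratio tests use
-- # exact integer comparisons instead of float division.
--
-- _FILLERS = frozenset({'you', 'i', 'uh', 'um', 'ah', 'so', 'ok', 'thank', 'well', 'like', 'just'})
--
--
-- def _filter_hallucinations(text: str) -> str:
--     while True:
--         if not text or len(text.strip()) < 3:
--             return text
--         words = text.split()
--         n = len(words)
--         norm = [w.lower().rstrip('.,!?;:') for w in words]
--         counts = {}
--         for m in norm:
--             counts[m] = counts.get(m, 0) + 1
--         best, best_c = "", 0
--         for k, c in counts.items():
--             if c > best_c:
--                 best, best_c = k, c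
--         if 10 * best_c <= n:
--             break
--         kept = [w for w, m in zip(words, norm) if m != best]
--         if not kept:
--             return ""
--         text = " ".join(kept)
--     real = [w for w, m in zip(words, norm) if m not in _FILLERS]
--     if 10 * (n - len(real)) > 3 * n:
--         return " ".join(real) if len(real) >= 3 else ""
--     return text.strip()
-- ===== Notes on version B (the rewrite author's own statement) =====
-- stated objective: alternative
-- what changed: Replaces A's tail recursion with an iterative while-loop that normalizes each word once per pass (A renormalizes in every comprehension), finds the top word by a single scan of the count dict's items instead of max(dict, key=dict.get), filters via zip with the precomputed normalized list, derives the filler count from the kept list's length instead of a separate summing pass, and uses exact integer ratio comparisons instead of float division.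
import Mathlib
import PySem

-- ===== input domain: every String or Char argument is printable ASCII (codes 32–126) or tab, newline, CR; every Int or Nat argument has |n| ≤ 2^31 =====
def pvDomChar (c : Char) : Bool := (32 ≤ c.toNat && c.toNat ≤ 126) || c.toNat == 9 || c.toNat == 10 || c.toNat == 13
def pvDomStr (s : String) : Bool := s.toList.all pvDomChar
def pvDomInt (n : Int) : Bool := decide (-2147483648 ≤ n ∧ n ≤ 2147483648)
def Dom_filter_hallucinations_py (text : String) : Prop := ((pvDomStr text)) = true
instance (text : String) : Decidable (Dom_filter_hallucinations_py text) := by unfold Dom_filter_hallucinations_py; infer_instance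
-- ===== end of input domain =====

-- B rewrites A's tail recursion as an iterative loop that normalizes each word once per
-- pass, picks the top word by a single items scan, and derives the filler count from the
-- kept list; objective: alternative (same asymptotic cost, fewer normalization passes).

-- shared helper: w.lower().rstrip('.,!?;:') — both Pythons use exactly this expression.
-- rstrip(chars) is ported by hand (drop trailing chars of the set via reverse/dropWhile); exact.
def pyNormWord (w : String) : String :=
  String.ofList (((PySem.Chars.lower w.toList).reverse.dropWhile
    (fun c => c ∈ ['.', ',', '!', '?', ';', ':'])).reverse)

-- shared constant: the set literal {'you', 'i', …} (both Pythons use the same literal)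
def hallucinationIndicators : PySem.Set String :=
  PySem.Set.ofList ["you", "i", "uh", "um", "ah", "so", "ok", "thank", "well", "like", "just"]

-- ===== PORT A =====
-- A's recursion carried on fuel to make it total; fuel = len(text)+1 always suffices
-- (each recursive call strictly decreases the number of words).
-- ratio tests `c/n > 0.1` and `h/n > 0.3` are ported as the exact integer comparisons
-- `10*c > n` and `10*h > 3*n` (equal to the Python float comparisons for these counts).
def fhA : Nat → String → String
  | 0, text => text
  | fuel + 1, text =>
    if text.toList = [] ∨ PySem.Str.len (PySem.Str.strip text) < 3 then text
    else
      let words := PySem.Str.split₀ text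
      let total : Int := words.length
      let word_counts := words.foldl
        (fun d w => d.insert (pyNormWord w) (d.getD (pyNormWord w) 0 + 1)) PySem.Dict.empty
      -- `if word_counts:` + `max(word_counts, key=word_counts.get)`: max? is none iff the dict is empty
      match PySem.List.max? word_counts.keys (fun k => word_counts.getD k 0) with
      | some most_common_word =>
        if total < 10 * word_counts.getD most_common_word 0 then
          let filtered_words := words.filter (fun w => pyNormWord w != most_common_word)
          if filtered_words = [] then ""
          else fhA fuel (PySem.Str.join " " filtered_words)
        else fhA_tail words text
      | none => fhA_tail words text
-- the filler-word block A falls through to (one Python code path, reached from both branches above)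
where fhA_tail (words : List String) (text : String) : String :=
  let total : Int := words.length
  let hallucin_count : Int := words.countP (fun w => hallucinationIndicators.contains (pyNormWord w))
  if 3 * total < 10 * hallucin_count then
    let real_words := words.filter (fun w => !hallucinationIndicators.contains (pyNormWord w))
    if 3 ≤ real_words.length then PySem.Str.join " " real_words else ""
  else PySem.Str.strip text

def filter_hallucinations_py (text : String) : String :=
  fhA (text.toList.length + 1) text

-- ===== PORT B =====
-- B's `while True:` loop as fuel recursion (same fuel bound); each pass: normalize once,
-- count over the normalized list, argmax by one scan of the dict items, filter by zip.
def fhB : Nat → String → String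
  | 0, text => text
  | fuel + 1, text =>
    if text.toList = [] ∨ PySem.Str.len (PySem.Str.strip text) < 3 then text
    else
      let words := PySem.Str.split₀ text
      let n : Int := words.length
      let norm := words.map pyNormWord
      let counts := norm.foldl (fun d m => d.insert m (d.getD m 0 + 1)) PySem.Dict.empty
      let best := counts.items.foldl
        (fun (b : String × Int) kv => if b.2 < kv.2 then kv else b) ("", 0)
      if 10 * best.2 ≤ n then
        -- break: the post-loop filler block
        let real := (words.zip norm).filterMap
          (fun p => if hallucinationIndicators.contains p.2 then none else some p.1)
        if 3 * n < 10 * (n - real.length) then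
          if 3 ≤ real.length then PySem.Str.join " " real else ""
        else PySem.Str.strip text
      else
        let kept := (words.zip norm).filterMap
          (fun p => if p.2 == best.1 then none else some p.1)
        if kept = [] then "" else fhB fuel (PySem.Str.join " " kept)

def filter_hallucinations_py_alt (text : String) : String :=
  fhB (text.toList.length + 1) text

-- ===== PRECONDITION & SPEC =====
def Spec_filter_hallucinations_py (text : String) (out : String) : Prop := out = filter_hallucinations_py_alt text
instance (text : String) (out : String) : Decidable (Spec_filter_hallucinations_py text out) := by unfold Spec_filter_hallucinations_py; infer_instance

-- ===== CLAIM (what is proved, stated in full; the proofs are below) =====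
def Claim_equal_filter_hallucinations_py : Prop := ∀ (text : String), Dom_filter_hallucinations_py text → Spec_filter_hallucinations_py text (filter_hallucinations_py text)

-- ===== LEMMAS AND PROOFS =====

-- B's zip-with-normalized filter is A's direct filter
theorem zip_filterMap_eq_filter (ws : List String) (f : String → String) (p : String → Bool) :
    (ws.zip (ws.map f)).filterMap (fun q => if p q.2 then none else some q.1)
      = ws.filter (fun w => !p (f w)) := by
  induction ws with
  | nil => rfl
  | cons w ws ih =>
    simp only [List.map_cons, List.zip_cons_cons, List.filterMap_cons, List.filter_cons]
    by_cases h : p (f w) <;> simp [h, ih]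

-- the pair-argmax over (k, c k) pairs mirrors the key-argmax, keeping snd = c fst
theorem pair_argmax_step (c : String → Int) (ks : List String) (x : String) :
    (ks.map (fun k => (k, c k))).foldl
        (fun (b : String × Int) kv => if b.2 < kv.2 then kv else b) (x, c x)
      = (ks.foldl (fun m k => if c m < c k then k else m) x,
         c (ks.foldl (fun m k => if c m < c k then k else m) x)) := by
  induction ks generalizing x with
  | nil => rfl
  | cons k ks ih =>
    simp only [List.map_cons, List.foldl_cons]
    by_cases h : c x < c k <;> simp only [h, if_pos, ite_false] <;> exact ih _

-- max? over a nonempty list is the plain foldl argmax from the head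
theorem max?_cons_eq_foldl (c : String → Int) (k0 : String) (ks : List String) :
    PySem.List.max? (k0 :: ks) (fun k => c k)
      = some (ks.foldl (fun m k => if c m < c k then k else m) k0) := by
  simp only [PySem.List.max?, List.foldl_cons]
  induction ks generalizing k0 with
  | nil => rfl
  | cons k ks ih =>
    simp only [List.foldl_cons]
    by_cases h : c k0 < c k <;> simp only [h, if_pos, ite_false] <;> exact ih _

-- one step: with equal fuel, A's recursion and B's loop body agree
theorem fhA_eq_fhB (fuel : Nat) (text : String) : fhA fuel text = fhB fuel text := by
  induction fuel generalizing text with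
  | zero => rfl
  | succ fuel ih =>
    rw [fhA, fhB]
    by_cases hg : text.toList = [] ∨ PySem.Str.len (PySem.Str.strip text) < 3
    · simp only [hg, if_pos]
    · simp only [hg, if_neg, not_false_iff]
      set words := PySem.Str.split₀ text with hwords
      -- both dicts are the counter of the normalized word list
      have hdict : words.foldl
          (fun d w => d.insert (pyNormWord w) (d.getD (pyNormWord w) 0 + 1)) PySem.Dict.empty
          = PySem.Dict.counter (words.map pyNormWord) := by
        rw [← PySem.Dict.foldl_insert_getD_add_one_eq_counter, List.foldl_map]
      have hdict' : (words.map pyNormWord).foldl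
          (fun d m => d.insert m (d.getD m 0 + 1)) PySem.Dict.empty
          = PySem.Dict.counter (words.map pyNormWord) :=
        PySem.Dict.foldl_insert_getD_add_one_eq_counter _
      set norm := words.map pyNormWord with hnorm
      set cnt := PySem.Dict.counter norm with hcnt
      rw [hdict, hdict']
      -- the filler tails agree (independent of how the dicts compare)
      have htail : fhA.fhA_tail words text
          = (let n : Int := words.length
             let real := (words.zip norm).filterMap
               (fun p => if hallucinationIndicators.contains p.2 then none else some p.1)
             if 3 * n < 10 * (n - real.length) then
               if 3 ≤ real.length then PySem.Str.join " " real else ""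
             else PySem.Str.strip text) := by
        rw [hnorm, zip_filterMap_eq_filter]
        simp only [fhA.fhA_tail]
        have hsplit : words.length =
            words.countP (fun w => hallucinationIndicators.contains (pyNormWord w)) +
            (words.filter (fun w => !hallucinationIndicators.contains (pyNormWord w))).length := by
          rw [← List.countP_eq_length_filter]
          rw [List.length_eq_countP_add_countP
            (fun w => hallucinationIndicators.contains (pyNormWord w))]
          simp
        have hcond : (3 * (words.length : Int) <
              10 * (words.countP (fun w => hallucinationIndicators.contains (pyNormWord w)) : Int))
            ↔ (3 * (words.length : Int) < 10 * ((words.length : Int) -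
              ((words.filter (fun w => !hallucinationIndicators.contains (pyNormWord w))).length : Int))) := by
          omega
        by_cases h : 3 * (words.length : Int) <
            10 * (words.countP (fun w => hallucinationIndicators.contains (pyNormWord w)) : Int)
        · rw [if_pos h, if_pos (hcond.mp h)]
        · rw [if_neg h, if_neg (fun hx => h (hcond.mpr hx))]
      -- case on whether the dict is empty, via its key set
      rcases hq : PySem.Set.ofList norm with _ | ⟨q0, qs⟩
      · -- empty dict: A's max? is none, B's argmax stays at count 0; both fall to the filler block
        have hkeys : cnt.keys = [] := by rw [hcnt, PySem.Dict.keys_counter, hq]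
        have hitems : cnt.items = [] := by
          rw [hcnt, PySem.Dict.items_counter, hq, List.map_nil]
        rw [hkeys, hitems]
        simp only [PySem.List.max?, List.foldl_nil]
        rw [if_pos (by positivity), htail]
      · -- nonempty: relate A's max? over keys to B's items fold
        have hkeys : cnt.keys = PySem.Set.ofList norm := by rw [hcnt]; exact PySem.Dict.keys_counter norm
        have hitems : cnt.items = (PySem.Set.ofList norm).map
            (fun k => (k, ((norm.count k : Nat) : Int))) := by
          rw [hcnt]; exact PySem.Dict.items_counter norm
        have hgetD : ∀ k, cnt.getD k 0 = ((norm.count k : Nat) : Int) := fun k => by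
          rw [hcnt]; exact PySem.Dict.getD_counter norm k
        set c : String → Int := fun k => ((norm.count k : Nat) : Int) with hc
        have hpos : ∀ k ∈ PySem.Set.ofList norm, 0 < c k := by
          intro k hk
          have : k ∈ norm := (PySem.Set.mem_ofList norm k).mp hk
          simp only [hc]
          exact_mod_cast List.count_pos_iff.mpr this
        -- A's max?
        have hmaxA : PySem.List.max? cnt.keys (fun k => cnt.getD k 0)
            = some ((qs.foldl (fun m k => if c m < c k then k else m) q0)) := by
          have heq : (fun k => cnt.getD k 0) = fun k => c k := funext fun k => hgetD k
          rw [heq, hkeys, hq, max?_cons_eq_foldl]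
        -- B's items fold
        have hmaxB : cnt.items.foldl
            (fun (b : String × Int) kv => if b.2 < kv.2 then kv else b) ("", 0)
            = (qs.foldl (fun m k => if c m < c k then k else m) q0,
               c (qs.foldl (fun m k => if c m < c k then k else m) q0)) := by
          rw [hitems, hq, List.map_cons, List.foldl_cons]
          have h0 : (0 : Int) < c q0 := hpos q0 (by rw [hq]; exact List.mem_cons_self ..)
          rw [if_pos h0]
          exact pair_argmax_step c qs q0
        rw [hmaxA, hmaxB]
        set m := qs.foldl (fun m k => if c m < c k then k else m) q0 with hm
        have hgm : cnt.getD m 0 = c m := hgetD m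
        simp only [hgm]
        by_cases hcmp : (words.length : Int) < 10 * c m
        · -- A recurses; B does not break
          have hnb : ¬(10 * c m ≤ (words.length : Int)) := by omega
          rw [if_pos hcmp, if_neg hnb]
          have hfilt : (words.zip norm).filterMap
              (fun p => if p.2 == m then none else some p.1)
              = words.filter (fun w => pyNormWord w != m) := by
            rw [hnorm, zip_filterMap_eq_filter (p := fun s => s == m)]
            rfl
          rw [hfilt]
          by_cases hemp : words.filter (fun w => pyNormWord w != m) = []
          · rw [if_pos hemp, if_pos hemp]
          · rw [if_neg hemp, if_neg hemp, ih]
        · have hb : 10 * c m ≤ (words.length : Int) := by omega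
          rw [if_neg hcmp, if_pos hb, htail]

-- ===== VERDICT (by name: the statement is the Claim_ definition above) =====
theorem filter_hallucinations_py_spec : Claim_equal_filter_hallucinations_py := by
  intro text _
  unfold Spec_filter_hallucinations_py filter_hallucinations_py filter_hallucinations_py_alt
  exact fhA_eq_fhB _ _
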